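-- pv_equiv track=rewrite | github.com/navidofek-cmyk/flowcore-async-orchestrator | flowcore/core/scheduler.py | _collect_downstream
-- ===== SOURCE A (Python) =====
-- from collections import defaultdict, deque
--
-- def _collect_downstream(node_id: str, dependents: dict[str, list[str]]) -> set[str]:
--     skipped: set[str] = set()
--     queue = deque([node_id])
--
--     while queue:
--         current = queue.popleft()
--         for dependent_id in dependents.get(current, []):
--             if dependent_id in skipped:
--                 continue
--             skipped.add(dependent_id)
--             queue.append(dependent_id)
--
--     return skipped
-- ===== SOURCE B (Python) =====
-- def _collect_downstream(node_id: str, dependents: dict[str, list[str]]) -> set[str]: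
--     skipped: set[str] = set()
--
--     def visit(current: str) -> None:
--         for dependent_id in dependents.get(current, []):
--             if dependent_id not in skipped:
--                 skipped.add(dependent_id)
--                 visit(dependent_id)
--
--     visit(node_id)
--     return skipped
-- ===== Notes on version B (the rewrite author's own statement) =====
-- stated objective: alternative
-- what changed: Replaces the iterative deque-based breadth-first traversal with a recursive depth-first traversal (inner visit() helper, mark-before-recurse), which explores nodes in a different order but collects the same reachable set.
import Mathlib
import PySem

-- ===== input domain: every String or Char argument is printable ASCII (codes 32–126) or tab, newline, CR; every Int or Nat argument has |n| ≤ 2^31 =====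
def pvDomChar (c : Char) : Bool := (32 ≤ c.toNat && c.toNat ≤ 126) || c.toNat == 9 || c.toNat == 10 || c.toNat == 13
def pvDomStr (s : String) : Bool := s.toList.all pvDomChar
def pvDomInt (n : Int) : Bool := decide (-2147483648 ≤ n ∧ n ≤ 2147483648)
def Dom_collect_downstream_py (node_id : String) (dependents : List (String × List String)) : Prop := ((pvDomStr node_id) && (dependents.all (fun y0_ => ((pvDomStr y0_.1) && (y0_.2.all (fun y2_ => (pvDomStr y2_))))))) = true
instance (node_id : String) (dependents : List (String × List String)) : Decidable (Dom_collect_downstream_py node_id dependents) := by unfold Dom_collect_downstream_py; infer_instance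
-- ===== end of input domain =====

-- B replaces A's iterative deque-based BFS by a recursive depth-first traversal (mark before
-- recursing); the traversals visit nodes in different orders but collect the same set, so both
-- ports return the set in its canonical sorted representation (Python returns a `set`, which has
-- no iteration order). Objective: alternative.

-- ===== PORT A =====
-- loop body of A's inner `for`: skip seen dependents, otherwise mark and record the queue append
def pvStepA (st : List String × List String) (dep : String) : List String × List String :=
  if PySem.Set.contains st.1 dep then st
  else (PySem.Set.add st.1 dep, st.2 ++ [dep])

-- termination support for the while-loop recursion (cited in decreasing_by)
def pvAll (dependents : List (String × List String)) : List String :=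
  (dependents.map Prod.snd).flatten

def pvM (dependents : List (String × List String)) (s q : List String) : Nat :=
  2 * ((pvAll dependents).filter (fun y => !PySem.Set.contains s y)).length + q.length

theorem pvStepA_pos (st : List String × List String) (d : String) (hm : d ∈ st.1) :
    pvStepA st d = st := by
  simp [pvStepA, PySem.Set.contains, hm]

theorem pvStepA_neg (st : List String × List String) (d : String) (hm : d ∉ st.1) :
    pvStepA st d = (st.1 ++ [d], st.2 ++ [d]) := by
  simp [pvStepA, PySem.Set.add, PySem.Set.contains, hm]

theorem pvFilter_lt (V : List String) (p q : String → Bool)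
    (himp : ∀ y, q y = true → p y = true) (x : String) (hx : x ∈ V)
    (hpx : p x = true) (hqx : q x = false) :
    (V.filter q).length < (V.filter p).length := by
  induction V with
  | nil => cases hx
  | cons a t ih =>
    simp only [List.filter_cons]
    by_cases hax : a = x
    · subst hax
      have hle : t.countP q ≤ t.countP p := List.countP_mono_left (fun a _ h => himp a h)
      simp only [hqx, hpx, Bool.false_eq_true, if_false, if_true, List.length_cons,
        ← List.countP_eq_length_filter]
      omega
    · have hxt : x ∈ t := by
        rcases List.mem_cons.1 hx with h1 | h1
        · exact absurd h1.symm hax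
        · exact h1
      cases hqa : q a with
      | true =>
        rw [himp a hqa]
        simpa using Nat.succ_lt_succ (ih hxt)
      | false =>
        cases hpa : p a with
        | true => simpa using Nat.lt_succ_of_lt (ih hxt)
        | false => exact ih hxt

theorem pvMem_getD (dependents : List (String × List String)) (c x : String)
    (h : x ∈ PySem.Dict.getD ⟨dependents⟩ c []) : x ∈ pvAll dependents := by
  induction dependents with
  | nil => simp [PySem.Dict.getD, PySem.Dict.get?] at h
  | cons p rest ih =>
    obtain ⟨k, v⟩ := p
    rw [PySem.Dict.getD, PySem.Dict.get?_mk_cons] at h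
    by_cases hk : (k == c) = true
    · rw [if_pos hk] at h
      simp only [Option.getD_some] at h
      simp only [pvAll, List.map_cons, List.flatten_cons, List.mem_append]
      exact Or.inl h
    · rw [if_neg hk] at h
      have := ih (by rw [PySem.Dict.getD]; exact h)
      simp only [pvAll, List.map_cons, List.flatten_cons, List.mem_append] at this ⊢
      exact Or.inr this

theorem pvFoldA_bound (V : List String) :
    ∀ (deps : List String), (∀ y ∈ deps, y ∈ V) →
    ∀ st : List String × List String,
    2 * ((V.filter (fun y => !PySem.Set.contains (deps.foldl pvStepA st).1 y)).length)
      + (deps.foldl pvStepA st).2.length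
    ≤ 2 * ((V.filter (fun y => !PySem.Set.contains st.1 y)).length) + st.2.length := by
  intro deps
  induction deps with
  | nil => intro _ st; simp
  | cons d ds ih =>
    intro hsub st
    have hds : ∀ y ∈ ds, y ∈ V := fun y hy => hsub y (List.mem_cons_of_mem _ hy)
    simp only [List.foldl_cons]
    by_cases hm : d ∈ st.1
    · rw [pvStepA_pos st d hm]
      exact ih hds st
    · rw [pvStepA_neg st d hm]
      refine le_trans (ih hds _) ?_
      simp only [List.length_append, List.length_cons, List.length_nil]
      have hlt : ((V.filter (fun y => !PySem.Set.contains (st.1 ++ [d]) y)).length)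
          < ((V.filter (fun y => !PySem.Set.contains st.1 y)).length) := by
        refine pvFilter_lt V _ _ ?_ d (hsub d List.mem_cons_self) ?_ ?_
        · intro y hy
          simp only [PySem.Set.contains, List.contains_eq_mem, List.mem_append,
            List.mem_singleton, Bool.not_eq_eq_eq_not, Bool.not_true,
            decide_eq_false_iff_not] at hy ⊢
          exact fun hin => hy (Or.inl hin)
        · simp [PySem.Set.contains, hm]
        · simp [PySem.Set.contains]
      omega

-- while queue: current = popleft(); the inner for-loop (pvStepA over dependents.get(current, []))
-- updates skipped and collects the ids appended to the queue during this iteration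
def pvGoA (dependents : List (String × List String)) (skipped : PySem.Set String)
    (queue : List String) : List String :=
  match queue with
  | [] => skipped
  | current :: rest =>
    let r := (PySem.Dict.getD ⟨dependents⟩ current []).foldl pvStepA (skipped, ([] : List String))
    pvGoA dependents r.1 (rest ++ r.2)
termination_by pvM dependents skipped queue
decreasing_by
  have h := pvFoldA_bound (pvAll dependents) (PySem.Dict.getD ⟨dependents⟩ current [])
    (fun y hy => pvMem_getD dependents current y hy) (skipped, ([] : List String))
  simp only [pvM, List.length_append, List.length_cons, List.length_nil] at h ⊢
  omega

def collect_downstream_py (node_id : String) (dependents : List (String × List String)) : List String :=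
  PySem.List.sorted (pvGoA dependents PySem.Set.empty [node_id]) (fun x => x) false

-- ===== PORT B =====
-- visit(current) unrolled over the pending list of dependents: for each unseen d, mark it and
-- recurse into dependents.get(d, []), then continue with the rest of the current list.
-- The fuel argument only makes the recursion structurally total (it strictly bounds the depth of
-- nested visit calls, each of which marks a fresh node, so with the starting fuel it never runs out).
def pvDfsB (dependents : List (String × List String)) :
    Nat → PySem.Set String → List String → PySem.Set String
  | _, s, [] => s
  | 0, s, _ :: _ => s
  | fuel + 1, s, d :: rest =>
    if PySem.Set.contains s d then pvDfsB dependents (fuel + 1) s rest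
    else
      pvDfsB dependents (fuel + 1)
        (pvDfsB dependents fuel (PySem.Set.add s d) (PySem.Dict.getD ⟨dependents⟩ d []))
        rest
termination_by fuel s l => (fuel, l.length)

def collect_downstream_py_alt (node_id : String) (dependents : List (String × List String)) : List String :=
  PySem.List.sorted
    (pvDfsB dependents ((pvAll dependents).length + 1) PySem.Set.empty
      (PySem.Dict.getD ⟨dependents⟩ node_id []))
    (fun x => x) false

-- ===== PRECONDITION & SPEC =====
def Spec_collect_downstream_py (node_id : String) (dependents : List (String × List String)) (out : List String) : Prop := out = collect_downstream_py_alt node_id dependents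
instance (node_id : String) (dependents : List (String × List String)) (out : List String) : Decidable (Spec_collect_downstream_py node_id dependents out) := by unfold Spec_collect_downstream_py; infer_instance

-- ===== CLAIM (what is proved, stated in full; the proofs are below) =====
def Claim_equal_collect_downstream_py : Prop := ∀ (node_id : String) (dependents : List (String × List String)), Dom_collect_downstream_py node_id dependents → Spec_collect_downstream_py node_id dependents (collect_downstream_py node_id dependents)

-- ===== LEMMAS AND PROOFS =====

-- nodes reachable from the root through at least one dependency edge
inductive pvReach (g : List (String × List String)) (root : String) : String → Prop
  | base {d : String} : d ∈ PySem.Dict.getD ⟨g⟩ root [] → pvReach g root d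
  | step {c d : String} : pvReach g root c → d ∈ PySem.Dict.getD ⟨g⟩ c [] → pvReach g root d

def pvU (g : List (String × List String)) (s : List String) : Nat :=
  ((pvAll g).filter (fun y => !PySem.Set.contains s y)).length

theorem pvU_antitone (g : List (String × List String)) (s t : List String)
    (h : ∀ x ∈ s, x ∈ t) : pvU g t ≤ pvU g s := by
  unfold pvU
  rw [← List.countP_eq_length_filter, ← List.countP_eq_length_filter]
  refine List.countP_mono_left (fun y _ hy => ?_)
  simp only [PySem.Set.contains, List.contains_eq_mem, Bool.not_eq_eq_eq_not, Bool.not_true,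
    decide_eq_false_iff_not] at hy ⊢
  exact fun hin => hy (h y hin)

theorem pvU_strict (g : List (String × List String)) (s : List String) (d : String)
    (hd : d ∈ pvAll g) (hds : d ∉ s) : pvU g (s ++ [d]) < pvU g s := by
  refine pvFilter_lt (pvAll g) _ _ ?_ d hd ?_ ?_
  · intro y hy
    simp only [PySem.Set.contains, List.contains_eq_mem, List.mem_append, List.mem_singleton,
      Bool.not_eq_eq_eq_not, Bool.not_true, decide_eq_false_iff_not] at hy ⊢
    exact fun hin => hy (Or.inl hin)
  · simp [PySem.Set.contains, hds]
  · simp [PySem.Set.contains]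

-- shape of A's inner for-loop: it appends the same block t of fresh dependents to both components
theorem pvFoldA_shape (deps : List String) : ∀ (s acc : List String),
    ∃ t : List String,
      deps.foldl pvStepA (s, acc) = (s ++ t, acc ++ t) ∧
      (∀ x ∈ t, x ∈ deps ∧ x ∉ s) ∧ t.Nodup ∧ (∀ x ∈ deps, x ∈ s ++ t) := by
  induction deps with
  | nil => intro s acc; exact ⟨[], by simp⟩
  | cons d ds ih =>
    intro s acc
    simp only [List.foldl_cons]
    by_cases hm : d ∈ s
    · rw [pvStepA_pos (s, acc) d hm]
      obtain ⟨t, h1, h2, h3, h4⟩ := ih s acc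
      refine ⟨t, h1, fun x hx => ⟨List.mem_cons_of_mem _ (h2 x hx).1, (h2 x hx).2⟩, h3, ?_⟩
      intro x hx
      rcases List.mem_cons.1 hx with hx | hx
      · subst hx; exact List.mem_append.2 (Or.inl hm)
      · exact h4 x hx
    · rw [pvStepA_neg (s, acc) d hm]
      obtain ⟨t, h1, h2, h3, h4⟩ := ih (s ++ [d]) (acc ++ [d])
      refine ⟨d :: t, ?_, ?_, ?_, ?_⟩
      · rw [h1]; simp
      · intro x hx
        rcases List.mem_cons.1 hx with hx | hx
        · subst hx; exact ⟨List.mem_cons_self, hm⟩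
        · have := h2 x hx
          refine ⟨List.mem_cons_of_mem _ this.1, fun hin => this.2 (List.mem_append.2 (Or.inl hin))⟩
      · refine List.nodup_cons.2 ⟨fun hdt => ?_, h3⟩
        exact (h2 d hdt).2 (List.mem_append.2 (Or.inr (List.mem_singleton.2 rfl)))
      · intro x hx
        rcases List.mem_cons.1 hx with hx | hx
        · subst hx; simp
        · have := h4 x hx
          simp only [List.mem_append, List.mem_cons] at this ⊢
          tauto

-- BFS: every collected node is reachable
theorem pvGoA_sound (g : List (String × List String)) (root : String) :
    ∀ (n : Nat) (s q : List String), pvM g s q ≤ n →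
    (∀ x ∈ s, pvReach g root x) → (∀ c ∈ q, c = root ∨ c ∈ s) →
    ∀ x ∈ pvGoA g s q, pvReach g root x := by
  intro n
  induction n with
  | zero =>
    intro s q h hs _
    have hq : q = [] := List.eq_nil_of_length_eq_zero (by simp only [pvM] at h; omega)
    subst hq; rw [pvGoA]; exact hs
  | succ n ih =>
    intro s q h hs hq
    match q with
    | [] => rw [pvGoA]; exact hs
    | current :: rest =>
      rw [pvGoA]
      obtain ⟨t, h1, h2, _, _⟩ := pvFoldA_shape (PySem.Dict.getD ⟨g⟩ current []) s []
      simp only [h1]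
      have hcur : pvReach g root current ∨ current = root := by
        rcases hq current List.mem_cons_self with h' | h'
        · exact Or.inr h'
        · exact Or.inl (hs current h')
      have hst : ∀ x ∈ s ++ t, pvReach g root x := by
        intro x hx
        rcases List.mem_append.1 hx with hx | hx
        · exact hs x hx
        · rcases hcur with hc | hc
          · exact pvReach.step hc (h2 x hx).1
          · subst hc; exact pvReach.base (h2 x hx).1
      have hqt : ∀ c ∈ rest ++ ([] ++ t), c = root ∨ c ∈ s ++ t := by
        intro c hc
        rcases List.mem_append.1 hc with hc | hc
        · rcases hq c (List.mem_cons_of_mem _ hc) with h' | h'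
          · exact Or.inl h'
          · exact Or.inr (List.mem_append.2 (Or.inl h'))
        · exact Or.inr (List.mem_append.2 (Or.inr (by simpa using hc)))
      have hb := pvFoldA_bound (pvAll g) (PySem.Dict.getD ⟨g⟩ current [])
        (fun y hy => pvMem_getD g current y hy) (s, ([] : List String))
      have hm' : pvM g (s ++ t) (rest ++ ([] ++ t)) ≤ n := by
        rw [h1] at hb
        simp only [pvM, List.length_append, List.length_cons, List.length_nil] at h hb ⊢
        omega
      exact ih (s ++ t) (rest ++ ([] ++ t)) hm' hst hqt

-- BFS: the collected set contains its start and is closed under dependency edges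
theorem pvGoA_closed (g : List (String × List String)) (root : String) :
    ∀ (n : Nat) (s q : List String), pvM g s q ≤ n →
    (∀ c, (c = root ∨ c ∈ s) → c ∈ q ∨ (∀ d ∈ PySem.Dict.getD ⟨g⟩ c [], d ∈ s)) →
    (∀ x ∈ s, x ∈ pvGoA g s q) ∧
    (∀ c, (c = root ∨ c ∈ pvGoA g s q) → ∀ d ∈ PySem.Dict.getD ⟨g⟩ c [], d ∈ pvGoA g s q) := by
  intro n
  induction n with
  | zero =>
    intro s q h hinv
    have hq : q = [] := List.eq_nil_of_length_eq_zero (by simp only [pvM] at h; omega)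
    subst hq; rw [pvGoA]
    refine ⟨fun x hx => hx, fun c hc d hd => ?_⟩
    rcases hinv c hc with h' | h'
    · cases h'
    · exact h' d hd
  | succ n ih =>
    intro s q h hinv
    match q with
    | [] =>
      rw [pvGoA]
      refine ⟨fun x hx => hx, fun c hc d hd => ?_⟩
      rcases hinv c hc with h' | h'
      · cases h'
      · exact h' d hd
    | current :: rest =>
      rw [pvGoA]
      obtain ⟨t, h1, h2, _, h4⟩ := pvFoldA_shape (PySem.Dict.getD ⟨g⟩ current []) s []
      simp only [h1]
      have hb := pvFoldA_bound (pvAll g) (PySem.Dict.getD ⟨g⟩ current [])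
        (fun y hy => pvMem_getD g current y hy) (s, ([] : List String))
      have hm' : pvM g (s ++ t) (rest ++ ([] ++ t)) ≤ n := by
        rw [h1] at hb
        simp only [pvM, List.length_append, List.length_cons, List.length_nil] at h hb ⊢
        omega
      have hinv' : ∀ c, (c = root ∨ c ∈ s ++ t) → c ∈ rest ++ ([] ++ t) ∨
          (∀ d ∈ PySem.Dict.getD ⟨g⟩ c [], d ∈ s ++ t) := by
        intro c hc
        by_cases hct : c ∈ t
        · exact Or.inl (List.mem_append.2 (Or.inr (by simpa using hct)))
        · have hc' : c = root ∨ c ∈ s := by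
            rcases hc with hc | hc
            · exact Or.inl hc
            · rcases List.mem_append.1 hc with hc | hc
              · exact Or.inr hc
              · exact absurd hc hct
          rcases hinv c hc' with h' | h'
          · rcases List.mem_cons.1 h' with h'' | h''
            · subst h''; exact Or.inr h4
            · exact Or.inl (List.mem_append.2 (Or.inl h''))
          · exact Or.inr (fun d hd => List.mem_append.2 (Or.inl (h' d hd)))
      obtain ⟨ha, hb'⟩ := ih (s ++ t) (rest ++ ([] ++ t)) hm' hinv'
      exact ⟨fun x hx => ha x (List.mem_append.2 (Or.inl hx)), hb'⟩

theorem pvGoA_nodup (g : List (String × List String)) :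
    ∀ (n : Nat) (s q : List String), pvM g s q ≤ n → s.Nodup → (pvGoA g s q).Nodup := by
  intro n
  induction n with
  | zero =>
    intro s q h hs
    have hq : q = [] := List.eq_nil_of_length_eq_zero (by simp only [pvM] at h; omega)
    subst hq; rw [pvGoA]; exact hs
  | succ n ih =>
    intro s q h hs
    match q with
    | [] => rw [pvGoA]; exact hs
    | current :: rest =>
      rw [pvGoA]
      obtain ⟨t, h1, h2, h3, _⟩ := pvFoldA_shape (PySem.Dict.getD ⟨g⟩ current []) s []
      simp only [h1]
      have hb := pvFoldA_bound (pvAll g) (PySem.Dict.getD ⟨g⟩ current [])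
        (fun y hy => pvMem_getD g current y hy) (s, ([] : List String))
      have hm' : pvM g (s ++ t) (rest ++ ([] ++ t)) ≤ n := by
        rw [h1] at hb
        simp only [pvM, List.length_append, List.length_cons, List.length_nil] at h hb ⊢
        omega
      refine ih (s ++ t) (rest ++ ([] ++ t)) hm' ?_
      refine List.nodup_append.2 ⟨hs, h3, ?_⟩
      intro x hx y hy heq
      subst heq
      exact (h2 x hy).2 hx

-- membership in PySem.Set.add
theorem pvMem_add (s : List String) (d x : String) :
    x ∈ PySem.Set.add s d ↔ x ∈ s ∨ x = d := by
  unfold PySem.Set.add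
  by_cases hm : d ∈ s
  · simp only [PySem.Set.contains, List.contains_eq_mem, hm, decide_true, if_true]
    constructor
    · exact Or.inl
    · rintro (h | h)
      · exact h
      · subst h; exact hm
  · simp [PySem.Set.contains, hm]

theorem pvNodup_add (s : List String) (d : String) (h : s.Nodup) :
    (PySem.Set.add s d).Nodup := by
  unfold PySem.Set.add
  by_cases hm : d ∈ s
  · simp only [PySem.Set.contains, List.contains_eq_mem, hm, decide_true, if_true]; exact h
  · simp only [PySem.Set.contains, List.contains_eq_mem, hm, decide_false,
      Bool.false_eq_true, if_false]
    refine List.nodup_append.2 ⟨h, List.nodup_singleton d, ?_⟩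
    intro a ha b hb heq
    rw [List.mem_singleton] at hb
    subst hb
    subst heq
    exact hm ha

-- DFS: the accumulator only grows
theorem pvDfsB_mono (g : List (String × List String)) :
    ∀ (fuel : Nat) (s l : List String) (x : String), x ∈ s → x ∈ pvDfsB g fuel s l := by
  intro fuel
  induction fuel with
  | zero =>
    intro s l x hx
    match l with
    | [] => rw [pvDfsB]; exact hx
    | d :: rest => rw [pvDfsB]; exact hx
  | succ fuel ih =>
    intro s l
    induction l generalizing s with
    | nil => intro x hx; rw [pvDfsB]; exact hx
    | cons d rest ihl =>
      intro x hx
      rw [pvDfsB]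
      by_cases hm : PySem.Set.contains s d = true
      · rw [if_pos hm]; exact ihl s x hx
      · rw [if_neg hm]
        refine ihl _ x (ih _ _ x ?_)
        exact (pvMem_add s d x).2 (Or.inl hx)

theorem pvDfsB_nodup (g : List (String × List String)) :
    ∀ (fuel : Nat) (s l : List String), s.Nodup → (pvDfsB g fuel s l).Nodup := by
  intro fuel
  induction fuel with
  | zero =>
    intro s l hs
    match l with
    | [] => rw [pvDfsB]; exact hs
    | d :: rest => rw [pvDfsB]; exact hs
  | succ fuel ih =>
    intro s l
    induction l generalizing s with
    | nil => intro hs; rw [pvDfsB]; exact hs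
    | cons d rest ihl =>
      intro hs
      rw [pvDfsB]
      by_cases hm : PySem.Set.contains s d = true
      · rw [if_pos hm]; exact ihl s hs
      · rw [if_neg hm]
        exact ihl _ (ih _ _ (pvNodup_add s d hs))

-- DFS: every collected node (outside the start set) is reachable
theorem pvDfsB_sound (g : List (String × List String)) (root : String) :
    ∀ (fuel : Nat) (s l : List String), (∀ d ∈ l, pvReach g root d) →
    ∀ x ∈ pvDfsB g fuel s l, x ∈ s ∨ pvReach g root x := by
  intro fuel
  induction fuel with
  | zero =>
    intro s l _ x hx
    match l with
    | [] => rw [pvDfsB] at hx; exact Or.inl hx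
    | d :: rest => rw [pvDfsB] at hx; exact Or.inl hx
  | succ fuel ih =>
    intro s l
    induction l generalizing s with
    | nil => intro _ x hx; rw [pvDfsB] at hx; exact Or.inl hx
    | cons d rest ihl =>
      intro hl x hx
      rw [pvDfsB] at hx
      have hrest : ∀ d' ∈ rest, pvReach g root d' :=
        fun d' hd' => hl d' (List.mem_cons_of_mem _ hd')
      by_cases hm : PySem.Set.contains s d = true
      · rw [if_pos hm] at hx; exact ihl s hrest x hx
      · rw [if_neg hm] at hx
        rcases ihl _ hrest x hx with hx1 | hx1
        · rcases ih _ _ (fun d' hd' => pvReach.step (hl d List.mem_cons_self) hd') x hx1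
            with hx2 | hx2
          · rcases (pvMem_add s d x).1 hx2 with h | h
            · exact Or.inl h
            · subst h; exact Or.inr (hl x List.mem_cons_self)
          · exact Or.inr hx2
        · exact Or.inr hx1

-- DFS: with sufficient fuel the result contains its pending list and is closed under edges
theorem pvDfsB_complete (g : List (String × List String)) :
    ∀ (fuel : Nat) (s l : List String), (∀ d ∈ l, d ∈ pvAll g) → pvU g s < fuel →
    (∀ d ∈ l, d ∈ pvDfsB g fuel s l) ∧
    (∀ c ∈ pvDfsB g fuel s l, c ∉ s →
      ∀ e ∈ PySem.Dict.getD ⟨g⟩ c [], e ∈ pvDfsB g fuel s l) := by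
  intro fuel
  induction fuel with
  | zero => intro s l _ hU; omega
  | succ fuel ih =>
    intro s l
    induction l generalizing s with
    | nil =>
      intro _ _
      rw [pvDfsB]
      exact ⟨fun d hd => absurd hd (List.not_mem_nil), fun c hc hcs => absurd hc hcs⟩
    | cons d rest ihl =>
      intro hl hU
      rw [pvDfsB]
      have hrest : ∀ d' ∈ rest, d' ∈ pvAll g :=
        fun d' hd' => hl d' (List.mem_cons_of_mem _ hd')
      by_cases hm : PySem.Set.contains s d = true
      · rw [if_pos hm]
        obtain ⟨p1, p2⟩ := ihl s hrest hU
        have hds : d ∈ s := by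
          simpa [PySem.Set.contains, List.contains_eq_mem] using hm
        refine ⟨fun d' hd' => ?_, p2⟩
        rcases List.mem_cons.1 hd' with h | h
        · subst h; exact pvDfsB_mono g _ s rest d' hds
        · exact p1 d' h
      · rw [if_neg hm]
        have hds : d ∉ s := by
          simpa [PySem.Set.contains, List.contains_eq_mem] using hm
        have hadd : PySem.Set.add s d = s ++ [d] := by
          simp [PySem.Set.add, PySem.Set.contains, hds]
        have hU1 : pvU g (PySem.Set.add s d) < fuel := by
          have := pvU_strict g s d (hl d List.mem_cons_self) hds
          rw [← hadd] at this
          omega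
        obtain ⟨q1, q2⟩ := ih (PySem.Set.add s d) (PySem.Dict.getD ⟨g⟩ d [])
          (fun e he => pvMem_getD g d e he) hU1
        set F1 := pvDfsB g fuel (PySem.Set.add s d) (PySem.Dict.getD ⟨g⟩ d []) with hF1
        have hUF1 : pvU g F1 < fuel + 1 := by
          have hmono : ∀ x ∈ PySem.Set.add s d, x ∈ F1 :=
            fun x hx => pvDfsB_mono g fuel _ _ x hx
          have := pvU_antitone g (PySem.Set.add s d) F1 hmono
          omega
        obtain ⟨r1, r2⟩ := ihl F1 hrest hUF1
        have hF1R : ∀ x ∈ F1, x ∈ pvDfsB g (fuel + 1) F1 rest :=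
          fun x hx => pvDfsB_mono g _ _ _ x hx
        refine ⟨fun d' hd' => ?_, fun c hc hcs e he => ?_⟩
        · rcases List.mem_cons.1 hd' with h | h
          · exact hF1R _ (pvDfsB_mono g fuel _ _ _ ((pvMem_add s d d').2 (Or.inr h)))
          · exact r1 d' h
        · by_cases hcF1 : c ∈ F1
          · by_cases hcd : c = d
            · subst hcd
              exact hF1R e (q1 e he)
            · have hcsd : c ∉ PySem.Set.add s d := by
                rw [pvMem_add]; rintro (h | h)
                · exact hcs h
                · exact hcd h
              exact hF1R e (q2 c hcF1 hcsd e he)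
          · exact r2 c hc hcF1 e he

-- membership characterisation of both results
theorem pvGoA_mem_iff (g : List (String × List String)) (root : String) (x : String) :
    x ∈ pvGoA g PySem.Set.empty [root] ↔ pvReach g root x := by
  constructor
  · intro hx
    refine pvGoA_sound g root (pvM g PySem.Set.empty [root]) _ _ (Nat.le_refl _)
      (fun y hy => absurd hy (List.not_mem_nil)) ?_ x hx
    intro c hc
    exact Or.inl (List.mem_singleton.1 hc)
  · intro hx
    have hinv : ∀ c, (c = root ∨ c ∈ (PySem.Set.empty : PySem.Set String)) →
        c ∈ [root] ∨ (∀ d ∈ PySem.Dict.getD ⟨g⟩ c [], d ∈ (PySem.Set.empty : PySem.Set String)) := by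
      intro c hc
      rcases hc with hc | hc
      · subst hc; exact Or.inl List.mem_cons_self
      · exact absurd hc (List.not_mem_nil)
    obtain ⟨_, hclosed⟩ := pvGoA_closed g root (pvM g PySem.Set.empty [root])
      PySem.Set.empty [root] (Nat.le_refl _) hinv
    induction hx with
    | base hd => exact hclosed root (Or.inl rfl) _ hd
    | step _ hd ihr => exact hclosed _ (Or.inr ihr) _ hd

theorem pvDfsB_mem_iff (g : List (String × List String)) (root : String) (x : String) :
    x ∈ pvDfsB g ((pvAll g).length + 1) PySem.Set.empty (PySem.Dict.getD ⟨g⟩ root [])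
      ↔ pvReach g root x := by
  have hU : pvU g PySem.Set.empty < (pvAll g).length + 1 := by
    have := List.length_filter_le (fun y => !PySem.Set.contains PySem.Set.empty y) (pvAll g)
    simp only [pvU]
    omega
  constructor
  · intro hx
    rcases pvDfsB_sound g root _ PySem.Set.empty _ (fun d hd => pvReach.base hd) x hx with h | h
    · exact absurd h (List.not_mem_nil)
    · exact h
  · intro hx
    obtain ⟨p1, p2⟩ := pvDfsB_complete g ((pvAll g).length + 1) PySem.Set.empty
      (PySem.Dict.getD ⟨g⟩ root []) (fun e he => pvMem_getD g root e he) hU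
    induction hx with
    | base hd => exact p1 _ hd
    | step _ hd ihr => exact p2 _ ihr (List.not_mem_nil) _ hd

-- ===== VERDICT (by name: the statement is the Claim_ definition above) =====
theorem collect_downstream_py_spec : Claim_equal_collect_downstream_py := by
  intro node_id dependents _
  show collect_downstream_py node_id dependents = collect_downstream_py_alt node_id dependents
  unfold collect_downstream_py collect_downstream_py_alt
  refine PySem.List.sorted_eq_sorted_of_perm _ _ _ (fun a b h => h) ?_
  refine List.perm_of_nodup_nodup_toFinset_eq ?_ ?_ ?_
  · exact pvGoA_nodup dependents _ _ _ (Nat.le_refl _) List.nodup_nil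
  · exact pvDfsB_nodup dependents _ _ _ List.nodup_nil
  · ext x
    simp only [List.mem_toFinset]
    rw [pvGoA_mem_iff, pvDfsB_mem_iff]
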